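-- pv_equiv track=rewrite | github.com/pypi-data/pypi-mirror-401 | packages/cce-agent/cce_agent-0.1.1.tar.gz/cce_agent-0.1.1/src/tools/openswe/code_tools.py | _is_valid_diff_content
-- ===== SOURCE A (Python) =====
-- def _is_valid_diff_content(content: str) -> bool:
--     """Check if content appears to be a valid diff format."""
--     if not content or len(content.strip()) < 10:
--         return False
--
--     lines = content.split("\n")
--
--     # Look for diff indicators
--     diff_indicators = ["diff --git", "--- ", "+++ ", "@@ ", "index ", "new file mode", "deleted file mode"]
--
--     # Check if any diff indicators are present
--     has_diff_indicators = any(any(line.startswith(indicator) for line in lines) for indicator in diff_indicators)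
--
--     if not has_diff_indicators:
--         return False
--
--     # Check for proper diff structure
--     has_file_headers = any(line.startswith("--- ") or line.startswith("+++ ") for line in lines)
--     has_hunk_headers = any(line.startswith("@@") for line in lines)
--
--     # Must have either file headers or hunk headers to be a valid diff
--     return has_file_headers or has_hunk_headers
-- ===== SOURCE B (Python) =====
-- # Single pass over the lines with two flags, replacing A's three separate any-scans;
-- # early True on a file header (which is itself an indicator), else True iff a "@@" hunk
-- # line and some indicator were both seen.
-- def _is_valid_diff_content(content: str) -> bool:
--     """Check if content appears to be a valid diff format."""
--     if not content or len(content.strip()) < 10: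
--         return False
--     indicators = ("diff --git", "--- ", "+++ ", "@@ ", "index ", "new file mode", "deleted file mode")
--     has_hunk = False
--     has_ind = False
--     for line in content.split("\n"):
--         if line.startswith("--- ") or line.startswith("+++ "):
--             return True
--         if not has_hunk and line.startswith("@@"):
--             has_hunk = True
--         if not has_ind and line.startswith(indicators):
--             has_ind = True
--     return has_hunk and has_ind
-- ===== Notes on version B (the rewrite author's own statement) =====
-- stated objective: simpler
-- what changed: Replaces A's three separate any-scans (a 7-indicator nested scan stage plus two header scans) by a single pass over the lines with two flags and an early return on a file header.
import Mathlib
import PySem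

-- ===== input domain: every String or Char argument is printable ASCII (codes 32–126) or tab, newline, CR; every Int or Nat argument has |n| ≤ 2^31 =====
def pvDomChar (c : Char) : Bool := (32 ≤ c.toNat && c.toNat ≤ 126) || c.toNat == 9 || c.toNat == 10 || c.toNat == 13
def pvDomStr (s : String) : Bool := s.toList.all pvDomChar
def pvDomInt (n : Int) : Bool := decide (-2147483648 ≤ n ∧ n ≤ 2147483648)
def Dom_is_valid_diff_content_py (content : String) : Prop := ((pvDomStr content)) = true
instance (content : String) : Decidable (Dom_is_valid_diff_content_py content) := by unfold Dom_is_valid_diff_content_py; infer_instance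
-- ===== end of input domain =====

-- B replaces A's three separate any-scans by one pass over the lines with two flags (simpler); same return value everywhere.

-- ===== PORT A =====
def pvIndicators : List String :=
  ["diff --git", "--- ", "+++ ", "@@ ", "index ", "new file mode", "deleted file mode"]

def is_valid_diff_content_py (content : String) : Bool :=
  if content == "" || PySem.Str.len (PySem.Str.strip content) < 10 then false
  else
    let lines := ((PySem.Str.split? content "\n").getD [])
    let has_diff_indicators :=
      pvIndicators.any (fun indicator => lines.any (fun line => PySem.Str.startswith line indicator))
    if !has_diff_indicators then false
    else
      let has_file_headers :=
        lines.any (fun line => PySem.Str.startswith line "--- " || PySem.Str.startswith line "+++ ")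
      let has_hunk_headers := lines.any (fun line => PySem.Str.startswith line "@@")
      has_file_headers || has_hunk_headers

-- ===== PORT B =====
def pvAltLoop : List String → Bool → Bool → Bool
  | [], has_hunk, has_ind => has_hunk && has_ind
  | line :: rest, has_hunk, has_ind =>
    if PySem.Str.startswith line "--- " || PySem.Str.startswith line "+++ " then true
    else
      pvAltLoop rest
        (if !has_hunk && PySem.Str.startswith line "@@" then true else has_hunk)
        (if !has_ind && pvIndicators.any (fun p => PySem.Str.startswith line p) then true else has_ind)

def is_valid_diff_content_py_alt (content : String) : Bool :=
  if content == "" || PySem.Str.len (PySem.Str.strip content) < 10 then false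
  else pvAltLoop (((PySem.Str.split? content "\n").getD [])) false false

-- ===== PRECONDITION & SPEC =====
def Spec_is_valid_diff_content_py (content : String) (out : Bool) : Prop := out = is_valid_diff_content_py_alt content
instance (content : String) (out : Bool) : Decidable (Spec_is_valid_diff_content_py content out) := by unfold Spec_is_valid_diff_content_py; infer_instance

-- ===== CLAIM (what is proved, stated in full; the proofs are below) =====
def Claim_equal_is_valid_diff_content_py : Prop := ∀ (content : String), Dom_is_valid_diff_content_py content → Spec_is_valid_diff_content_py content (is_valid_diff_content_py content)

-- ===== LEMMAS AND PROOFS =====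

-- abbreviations for the three per-line tests
def pvIsFile (line : String) : Bool :=
  PySem.Str.startswith line "--- " || PySem.Str.startswith line "+++ "
def pvIsHunk (line : String) : Bool := PySem.Str.startswith line "@@"
def pvIsInd (line : String) : Bool := pvIndicators.any (fun p => PySem.Str.startswith line p)

-- the single pass computes "some file header, or (seen-hunk and seen-indicator)"
theorem pvAltLoop_eq (ls : List String) (h i : Bool) :
    pvAltLoop ls h i = (ls.any pvIsFile || ((h || ls.any pvIsHunk) && (i || ls.any pvIsInd))) := by
  induction ls generalizing h i with
  | nil => simp [pvAltLoop]
  | cons l ls ih =>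
    simp only [pvAltLoop, List.any_cons]
    cases hF : PySem.Str.startswith l "--- " <;>
      cases hP : PySem.Str.startswith l "+++ " <;>
        simp only [ih, pvIsFile, pvIsHunk, pvIsInd, hF, hP] <;>
          cases h <;> cases i <;>
            cases hH : PySem.Str.startswith l "@@" <;>
              cases hI : pvIndicators.any (fun p => PySem.Str.startswith l p) <;> simp_all

-- swap the order of A's nested any-scans
theorem pvAny_comm (as bs : List String) (p : String → String → Bool) :
    as.any (fun a => bs.any (fun b => p a b)) = bs.any (fun b => as.any (fun a => p a b)) := by
  rw [Bool.eq_iff_iff]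
  simp only [List.any_eq_true]
  tauto

-- a file header line is itself an indicator line
theorem pvIsFile_imp_ind (l : String) (h : pvIsFile l = true) : pvIsInd l = true := by
  unfold pvIsFile at h
  unfold pvIsInd pvIndicators
  rcases Bool.or_eq_true_iff.mp h with h' | h' <;> simp only [List.any_cons, h'] <;> simp

-- ===== VERDICT (by name: the statement is the Claim_ definition above) =====
theorem is_valid_diff_content_py_spec : Claim_equal_is_valid_diff_content_py := by
  intro content _
  unfold Spec_is_valid_diff_content_py is_valid_diff_content_py is_valid_diff_content_py_alt
  by_cases hg : (content == "" || PySem.Str.len (PySem.Str.strip content) < 10) = true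
  · simp only [hg, if_true]
  · simp only [Bool.not_eq_true] at hg
    simp only [hg, Bool.false_eq_true, if_false]
    rw [pvAltLoop_eq]
    set lines := ((PySem.Str.split? content "\n").getD []) with hl
    rw [pvAny_comm pvIndicators lines (fun ind line => PySem.Str.startswith line ind)]
    have hind : (lines.any fun b => pvIndicators.any fun a => PySem.Str.startswith b a)
        = lines.any pvIsInd := by
      unfold pvIsInd pvIndicators
      rfl
    rw [hind]
    have hF : (lines.any fun line => PySem.Str.startswith line "--- " || PySem.Str.startswith line "+++ ")
        = lines.any pvIsFile := rfl
    have hH : (lines.any fun line => PySem.Str.startswith line "@@") = lines.any pvIsHunk := rfl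
    rw [hF, hH]
    by_cases hInd : lines.any pvIsInd = true
    · simp only [hInd]
      cases lines.any pvIsFile <;> cases lines.any pvIsHunk <;> simp
    · have himp : lines.any pvIsFile = true → lines.any pvIsInd = true := by
        intro h
        rcases List.any_eq_true.mp h with ⟨l, hm, hf⟩
        exact List.any_eq_true.mpr ⟨l, hm, pvIsFile_imp_ind l hf⟩
      have hF2 : lines.any pvIsFile = false := by
        cases hx : lines.any pvIsFile
        · rfl
        · exact absurd (himp hx) hInd
      simp only [Bool.not_eq_true] at hInd
      simp [hInd, hF2]
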